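-- pv_equiv track=rewrite | github.com/morphicsnet/superposition-solver | python/stii/compute.py | enumerate_subsets
-- ===== SOURCE A (Python) =====
-- from typing import Dict, List, Tuple
--
-- def enumerate_subsets(m: int, max_order_k: int) -> List[int]:
--     """
--     Enumerate non-empty subset bitmasks over m elements, constrained to order <= max_order_k.
--     Returns masks sorted by (subset_size, mask).
--     """
--     if m <= 0:
--         return []
--     k = int(max(1, min(m, int(max_order_k))))
--     masks: List[int] = []
--     full = 1 << m
--     for mask in range(1, full):
--         if mask.bit_count() <= k:
--             masks.append(mask)
--     masks.sort(key=lambda b: (b.bit_count(), b))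
--     return masks
-- ===== SOURCE B (Python) =====
-- from typing import List
--
-- def enumerate_subsets(m: int, max_order_k: int) -> List[int]:
--     """Bucket (counting-sort) version: one pass over masks distributing them
--     into per-size buckets, then concatenate -- no comparison sort."""
--     if m <= 0:
--         return []
--     k = max(1, min(m, int(max_order_k)))
--     buckets: List[List[int]] = [[] for _ in range(k + 1)]
--     for mask in range(1, 1 << m):
--         s = mask.bit_count()
--         if s <= k:
--             buckets[s].append(mask)
--     out: List[int] = []
--     for b in buckets:
--         out.extend(b)
--     return out
-- ===== Notes on version B (the rewrite author's own statement) =====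
-- stated objective: alternative
-- what changed: A filters the 2^m masks and then comparison-sorts them with a (bit_count, mask) tuple key; B makes one bucketing pass that drops each mask into its subset-size bucket (a counting sort on the size key, the masks already arrive in increasing order) and concatenates the buckets, so no sort is performed.
import Mathlib
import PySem

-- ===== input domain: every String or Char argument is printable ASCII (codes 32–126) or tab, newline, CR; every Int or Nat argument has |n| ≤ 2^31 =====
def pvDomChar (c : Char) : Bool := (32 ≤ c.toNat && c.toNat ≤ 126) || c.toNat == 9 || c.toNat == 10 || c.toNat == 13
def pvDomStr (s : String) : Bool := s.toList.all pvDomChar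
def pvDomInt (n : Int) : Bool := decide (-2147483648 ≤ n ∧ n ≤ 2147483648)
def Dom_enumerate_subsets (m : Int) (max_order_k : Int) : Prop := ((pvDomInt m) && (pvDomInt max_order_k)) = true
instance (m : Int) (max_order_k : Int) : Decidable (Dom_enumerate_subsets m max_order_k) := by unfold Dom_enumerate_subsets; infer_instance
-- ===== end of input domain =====

-- B replaces A's filter-then-comparison-sort by a single bucketing pass that drops each mask
-- into its subset-size bucket and concatenates the buckets (a counting sort on the size key).


-- ===== PORT A =====
def enumerate_subsets (m : Int) (max_order_k : Int) : List Int :=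
  if m ≤ 0 then []
  else
    let k : Int := max 1 (min m max_order_k)
    let full : Int := (1 : Int) <<< m.toNat
    let masks : List Int := (PySem.List.pyRange 1 full 1).foldl
      (fun acc mask => if ((PySem.Int.bitCount mask : Int)) ≤ k then acc ++ [mask] else acc) []
    PySem.List.sorted2 masks (fun b => ((PySem.Int.bitCount b : Int))) (fun b => b)

-- ===== PORT B =====
def enumerate_subsets_alt (m : Int) (max_order_k : Int) : List Int :=
  if m ≤ 0 then []
  else
    let k : Int := max 1 (min m max_order_k)
    let buckets0 : List (List Int) := List.replicate (k.toNat + 1) []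
    let full : Int := (1 : Int) <<< m.toNat
    let buckets : List (List Int) := (PySem.List.pyRange 1 full 1).foldl
      (fun bs mask =>
        let s : Int := ((PySem.Int.bitCount mask : Int))
        if s ≤ k then bs.modify s.toNat (fun b => b ++ [mask]) else bs) buckets0
    buckets.foldl (fun out b => out ++ b) []

-- ===== PRECONDITION & SPEC =====
def Spec_enumerate_subsets (m : Int) (max_order_k : Int) (out : List Int) : Prop := out = enumerate_subsets_alt m max_order_k
instance (m : Int) (max_order_k : Int) (out : List Int) : Decidable (Spec_enumerate_subsets m max_order_k out) := by unfold Spec_enumerate_subsets; infer_instance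

-- ===== CLAIM (what is proved, stated in full; the proofs are below) =====
def Claim_equal_enumerate_subsets : Prop := ∀ (m : Int) (max_order_k : Int), Dom_enumerate_subsets m max_order_k → Spec_enumerate_subsets m max_order_k (enumerate_subsets m max_order_k)

-- ===== LEMMAS AND PROOFS =====

-- the lexicographic key A sorts by
def pvKey (x : Int) : Lex (Int × Int) := toLex ((PySem.Int.bitCount x : Int), x)

-- A's accumulating loop is a filter
theorem pv_foldl_filter (k : Int) (L : List Int) (acc : List Int) :
    L.foldl (fun acc mask => if ((PySem.Int.bitCount mask : Int)) ≤ k then acc ++ [mask] else acc) acc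
      = acc ++ L.filter (fun mask => decide (((PySem.Int.bitCount mask : Int)) ≤ k)) := by
  induction L generalizing acc with
  | nil => simp
  | cons x L ih =>
    by_cases h : ((PySem.Int.bitCount x : Int)) ≤ k <;>
      simp [List.foldl_cons, h, ih]

-- B's bucketing loop, abbreviated (definitionally the step function of the port)
def pvStep (k : Int) : List (List Int) → Int → List (List Int) := fun bs mask =>
  let s : Int := ((PySem.Int.bitCount mask : Int))
  if s ≤ k then bs.modify s.toNat (fun b => b ++ [mask]) else bs

-- B's bucketing loop: bucket s collects exactly the masks of bit count s, in order
theorem pv_bucket_fold (k : Int) (L : List Int) :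
    ∀ (B0 : List (List Int)), (∀ i, i < B0.length → (i : Int) ≤ k) →
    L.foldl (pvStep k) B0
      = B0.mapIdx (fun s b => b ++ L.filter (fun mask => PySem.Int.bitCount mask == s)) := by
  induction L with
  | nil =>
    intro B0 _
    apply List.ext_getElem
    · simp
    · simp
  | cons x L ih =>
    intro B0 hB
    rw [List.foldl_cons]
    by_cases h : ((PySem.Int.bitCount x : Int)) ≤ k
    · rw [show pvStep k B0 x = B0.modify (PySem.Int.bitCount x) (fun b => b ++ [x]) from by
        simp [pvStep, h]]
      rw [ih _ (by intro i hi; exact hB i (by simpa using hi))]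
      apply List.ext_getElem
      · simp
      · intro i h1 h2
        simp only [List.getElem_mapIdx, List.getElem_modify, List.filter_cons]
        by_cases hix : PySem.Int.bitCount x = i
        · simp [hix]
        · have : (PySem.Int.bitCount x == i) = false := by simpa using hix
          simp [hix, this]
    · rw [show pvStep k B0 x = B0 from by simp [pvStep, h]]
      rw [ih B0 hB]
      apply List.ext_getElem
      · simp
      · intro i h1 h2
        have hik : (i : Int) ≤ k := hB i (by simpa using h1)
        have hne : ¬ PySem.Int.bitCount x = i := by
          intro hEq; apply h; rw [hEq]; exact_mod_cast hik
        simp [List.getElem_mapIdx, List.filter_cons, hne]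

theorem pv_mapIdx_replicate (n : Nat) (f : Nat → List Int) :
    (List.replicate n ([] : List Int)).mapIdx (fun s b => b ++ f s) = (List.range n).map f := by
  apply List.ext_getElem
  · simp
  · simp

theorem pv_foldl_flatten (bs : List (List Int)) : ∀ acc : List Int,
    bs.foldl (fun out b => out ++ b) acc = acc ++ bs.flatten := by
  induction bs with
  | nil => simp
  | cons b bs ih => intro acc; simp [List.foldl_cons, ih, List.append_assoc]

-- the buckets, concatenated, are a permutation of the ≤ n filter
theorem pv_perm (n : Nat) (M : List Int) :
    (((List.range (n+1)).map (fun s => M.filter (fun x => PySem.Int.bitCount x == s))).flatten).Perm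
      (M.filter (fun x => decide (PySem.Int.bitCount x ≤ n))) := by
  induction n with
  | zero =>
    rw [show List.range (0+1) = [0] from rfl]
    simp only [List.map_cons, List.map_nil, List.flatten_cons, List.flatten_nil, List.append_nil]
    have : (fun x => PySem.Int.bitCount x == 0) = (fun x => decide (PySem.Int.bitCount x ≤ 0)) := by
      funext x
      by_cases h : PySem.Int.bitCount x = 0
      · simp [h]
      · have h' : ¬ PySem.Int.bitCount x ≤ 0 := by omega
        simp [h, h']
    rw [this]
  | succ n ih =>
    rw [List.range_succ, List.map_append, List.flatten_append]
    simp only [List.map_cons, List.map_nil, List.flatten_cons, List.flatten_nil, List.append_nil]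
    have hsplit := List.filter_append_perm (fun x => decide (PySem.Int.bitCount x ≤ n))
      (M.filter (fun x => decide (PySem.Int.bitCount x ≤ n + 1)))
    rw [List.filter_filter, List.filter_filter] at hsplit
    have h1 : (fun a => decide (PySem.Int.bitCount a ≤ n) && decide (PySem.Int.bitCount a ≤ n + 1))
        = (fun a => decide (PySem.Int.bitCount a ≤ n)) := by
      funext a
      by_cases h : PySem.Int.bitCount a ≤ n
      · simp [h]
        omega
      · simp [h]
    have h2 : (fun a => !decide (PySem.Int.bitCount a ≤ n) && decide (PySem.Int.bitCount a ≤ n + 1))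
        = (fun a => PySem.Int.bitCount a == n + 1) := by
      funext a
      by_cases h : PySem.Int.bitCount a = n + 1
      · simp [h]
      · by_cases h' : PySem.Int.bitCount a ≤ n
        · simp [h, h']
        · have h'' : ¬ PySem.Int.bitCount a ≤ n + 1 := by omega
          simp [h, h', h'']
    rw [h1, h2] at hsplit
    exact (ih.append (List.Perm.refl _)).trans hsplit

-- one bucket is strictly increasing in the lexicographic key
theorem pv_bucket_pairwise (s : Nat) (M : List Int) (hM : M.Pairwise (· < ·)) :
    (M.filter (fun x => PySem.Int.bitCount x == s)).Pairwise (fun a b => pvKey a < pvKey b) := by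
  have hsub : (M.filter (fun x => PySem.Int.bitCount x == s)).Pairwise (· < ·) :=
    List.Pairwise.sublist List.filter_sublist hM
  apply hsub.imp_of_mem
  intro a b ha hb hab
  have ha' := (List.mem_filter.mp ha).2
  have hb' := (List.mem_filter.mp hb).2
  have ha'' : PySem.Int.bitCount a = s := by simpa using ha'
  have hb'' : PySem.Int.bitCount b = s := by simpa using hb'
  unfold pvKey
  rw [Prod.Lex.toLex_lt_toLex]
  refine Or.inr ⟨?_, hab⟩
  show ((PySem.Int.bitCount a : Int)) = ((PySem.Int.bitCount b : Int))
  rw [ha'', hb'']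

-- the concatenation of all buckets is strictly increasing in the lexicographic key
theorem pv_pairwise (n : Nat) (M : List Int) (hM : M.Pairwise (· < ·)) :
    List.Pairwise (fun a b => pvKey a < pvKey b)
      (((List.range (n+1)).map (fun s => M.filter (fun x => PySem.Int.bitCount x == s))).flatten) := by
  induction n with
  | zero =>
    rw [show List.range (0+1) = [0] from rfl]
    simp only [List.map_cons, List.map_nil, List.flatten_cons, List.flatten_nil, List.append_nil]
    exact pv_bucket_pairwise 0 M hM
  | succ n ih =>
    rw [List.range_succ, List.map_append, List.flatten_append]
    simp only [List.map_cons, List.map_nil, List.flatten_cons, List.flatten_nil, List.append_nil]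
    rw [List.pairwise_append]
    refine ⟨ih, pv_bucket_pairwise _ M hM, ?_⟩
    intro a ha b hb
    have hbc : PySem.Int.bitCount b = n + 1 := by
      simpa using (List.mem_filter.mp hb).2
    obtain ⟨l, hl, hal⟩ := List.mem_flatten.mp ha
    obtain ⟨s, hs, rfl⟩ := List.mem_map.mp hl
    have hsn : s < n + 1 := List.mem_range.mp hs
    have hac : PySem.Int.bitCount a = s := by
      simpa using (List.mem_filter.mp hal).2
    unfold pvKey
    rw [Prod.Lex.toLex_lt_toLex]
    refine Or.inl ?_
    show ((PySem.Int.bitCount a : Int)) < ((PySem.Int.bitCount b : Int))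
    exact_mod_cast (by omega : PySem.Int.bitCount a < PySem.Int.bitCount b)

-- sorted2 with int keys IS sorted by the lexicographic pair key
theorem pv_before_eq (a1 a2 b1 b2 : Int) :
    (decide (a1 < b1) || (!decide (b1 < a1) && decide (a2 < b2)))
      = decide (toLex (a1, a2) < toLex (b1, b2)) := by
  rw [Bool.eq_iff_iff]
  simp only [Bool.or_eq_true, Bool.and_eq_true, Bool.not_eq_true', decide_eq_true_eq,
    decide_eq_false_iff_not, Prod.Lex.toLex_lt_toLex]
  constructor
  · rintro (h | ⟨h1, h2⟩)
    · exact Or.inl h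
    · rcases lt_trichotomy a1 b1 with h' | h' | h'
      · exact Or.inl h'
      · exact Or.inr ⟨h', h2⟩
      · exact absurd h' h1
  · rintro (h | ⟨h1, h2⟩)
    · exact Or.inl h
    · exact Or.inr ⟨by omega, h2⟩

theorem pv_sorted2_lex (xs : List Int) (k1 k2 : Int → Int) :
    PySem.List.sorted2 xs k1 k2 = PySem.List.sorted xs (fun x => toLex (k1 x, k2 x)) := by
  unfold PySem.List.sorted2 PySem.List.sorted
  simp only [if_neg (by simp : ¬((false : Bool) = true))]
  congr 1
  funext acc x
  congr 1
  funext a b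
  exact pv_before_eq (k1 a) (k2 a) (k1 b) (k2 b)

theorem pv_filter_pred_eq (k : Int) (hk : 0 ≤ k) :
    (fun mask => decide (((PySem.Int.bitCount mask : Int)) ≤ k))
      = (fun x => decide (PySem.Int.bitCount x ≤ k.toNat)) := by
  funext mask
  have hkt : (k.toNat : Int) = k := Int.toNat_of_nonneg hk
  by_cases h : PySem.Int.bitCount mask ≤ k.toNat
  · have h' : ((PySem.Int.bitCount mask : Int)) ≤ k := by omega
    simp [h, h']
  · have h' : ¬ ((PySem.Int.bitCount mask : Int)) ≤ k := by omega
    simp [h, h']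

-- ===== VERDICT (by name: the statement is the Claim_ definition above) =====
theorem enumerate_subsets_spec : Claim_equal_enumerate_subsets := by
  intro m max_order_k _
  unfold Spec_enumerate_subsets enumerate_subsets enumerate_subsets_alt
  by_cases hm : m ≤ 0
  · simp [hm]
  · simp only [hm, if_neg, not_false_iff]
    set k : Int := max 1 (min m max_order_k) with hkdef
    have hk1 : 1 ≤ k := le_max_left _ _
    set L : List Int := PySem.List.pyRange 1 ((1 : Int) <<< m.toNat) 1 with hLdef
    -- B side: bucket fold → buckets → flatten
    have hconv : (L.foldl (fun bs mask =>
        let s : Int := ((PySem.Int.bitCount mask : Int))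
        if s ≤ k then bs.modify s.toNat (fun b => b ++ [mask]) else bs)
        (List.replicate (k.toNat + 1) [])) = L.foldl (pvStep k) (List.replicate (k.toNat + 1) []) := rfl
    rw [hconv, pv_bucket_fold k L (List.replicate (k.toNat + 1) [])
      (by intro i hi; simp only [List.length_replicate] at hi; omega)]
    rw [pv_mapIdx_replicate, pv_foldl_flatten, List.nil_append]
    -- A side: loop → filter, sorted2 → lex sorted
    rw [pv_foldl_filter, List.nil_append, pv_sorted2_lex]
    -- identify the two
    apply PySem.List.sorted_eq_of_perm_of_pairwise_lt
      (key := fun x => toLex ((PySem.Int.bitCount x : Int), x))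
    · rw [pv_filter_pred_eq k (by omega)]
      exact pv_perm k.toNat L
    · have hL : L.Pairwise (· < ·) := PySem.List.pairwise_lt_pyRange_one 1 _
      exact pv_pairwise k.toNat L hL
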